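-- pv_equiv track=rewrite | github.com/rouskinlab/dreem | dreem/core/dependencies.py | split_conditions
-- ===== SOURCE A (Python) =====
-- def split_conditions(conditions):
--     """
--     example:
--     '>=3.4.5!=3.5.0<4.0' -> [('>=', '3.4.5'), ('!=', '3.5.0'), ('<', '4.0')]
--     """
--     out = []
--     i = 0
--     while i < len(conditions):
--         for operator in ('>=', '>', '<=', '<', '!=', '='):
--             if conditions.startswith(operator, i):
--                 i += len(operator)
--                 j = i
--                 while j < len(conditions) and not conditions[j] in ('>=', '>', '<=', '<', '!=', '=','!'):
--                     j += 1
--                 out.append((operator, conditions[i:j]))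
--                 i = j
--                 break
--         else:
--             raise ValueError('Invalid operator in conditions')
--     return out
-- ===== SOURCE B (Python) =====
-- def split_conditions(conditions):
--     """
--     example:
--     '>=3.4.5!=3.5.0<4.0' -> [('>=', '3.4.5'), ('!=', '3.5.0'), ('<', '4.0')]
--     """
--     entries = []
--     for c in conditions:
--         if c in '><=!':
--             if c == '=' and entries and entries[-1][0] in ('>', '<', '!') and not entries[-1][1]:
--                 entries[-1] = (entries[-1][0] + '=', '')
--             else:
--                 entries.append((c, ''))
--         elif entries:
--             op, v = entries[-1]
--             entries[-1] = (op, v + c)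
--         else:
--             raise ValueError('Invalid operator in conditions')
--     if any(op == '!' for op, _ in entries):
--         raise ValueError('Invalid operator in conditions')
--     return entries
-- ===== Notes on version B (the rewrite author's own statement) =====
-- stated objective: alternative
-- what changed: Replaces A's two-level scan (outer while trying each operator prefix, inner while collecting version chars) by a single character-at-a-time state machine that appends to or merges into the last (operator, version) entry, with a final validity check for lone '!'.
import Mathlib
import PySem

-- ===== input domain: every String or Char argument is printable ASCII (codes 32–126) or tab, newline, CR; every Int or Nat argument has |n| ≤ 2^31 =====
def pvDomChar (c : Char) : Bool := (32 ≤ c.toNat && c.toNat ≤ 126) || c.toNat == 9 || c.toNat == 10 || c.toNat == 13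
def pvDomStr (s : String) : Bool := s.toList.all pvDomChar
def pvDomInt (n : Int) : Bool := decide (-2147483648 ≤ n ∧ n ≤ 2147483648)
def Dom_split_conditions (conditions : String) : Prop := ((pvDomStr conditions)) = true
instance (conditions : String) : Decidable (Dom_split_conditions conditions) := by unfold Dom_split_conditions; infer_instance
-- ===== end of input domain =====

-- B replaces A's operator-prefix scanning (outer while + inner version scan) by a single-pass
-- per-character state machine (alternative decomposition, same O(n) cost); equality of return
-- values is proved on Pre_, the inputs where the Python A returns instead of raising ValueError.

-- ===== PORT A =====

-- the membership test `conditions[j] in ('>=', '>', '<=', '<', '!=', '=', '!')` on a single char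
def pdelim (c : Char) : Bool := c == '>' || c == '<' || c == '=' || c == '!'
def loopA (r : List Char) : Option (List (List Char × List Char)) :=
  if _h0 : r = [] then some []
  else if _h1 : ['>', '='].isPrefixOf r then
    (loopA ((r.drop 2).dropWhile (fun c => !pdelim c))).map
      (fun l => (['>', '='], (r.drop 2).takeWhile (fun c => !pdelim c)) :: l)
  else if _h2 : ['>'].isPrefixOf r then
    (loopA ((r.drop 1).dropWhile (fun c => !pdelim c))).map
      (fun l => (['>'], (r.drop 1).takeWhile (fun c => !pdelim c)) :: l)
  else if _h3 : ['<', '='].isPrefixOf r then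
    (loopA ((r.drop 2).dropWhile (fun c => !pdelim c))).map
      (fun l => (['<', '='], (r.drop 2).takeWhile (fun c => !pdelim c)) :: l)
  else if _h4 : ['<'].isPrefixOf r then
    (loopA ((r.drop 1).dropWhile (fun c => !pdelim c))).map
      (fun l => (['<'], (r.drop 1).takeWhile (fun c => !pdelim c)) :: l)
  else if _h5 : ['!', '='].isPrefixOf r then
    (loopA ((r.drop 2).dropWhile (fun c => !pdelim c))).map
      (fun l => (['!', '='], (r.drop 2).takeWhile (fun c => !pdelim c)) :: l)
  else if _h6 : ['='].isPrefixOf r then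
    (loopA ((r.drop 1).dropWhile (fun c => !pdelim c))).map
      (fun l => (['='], (r.drop 1).takeWhile (fun c => !pdelim c)) :: l)
  else none
termination_by r.length
decreasing_by
  all_goals {
    have h2 := List.length_dropWhile_le (fun c => !pdelim c) (r.drop 2)
    have h1 := List.length_dropWhile_le (fun c => !pdelim c) (r.drop 1)
    have hr : r.length ≠ 0 := by simpa using _h0
    simp only [List.length_drop] at h2 h1
    omega }

def split_conditions (conditions : String) : List (String × String) :=
  ((loopA conditions.toList).getD []).map (fun p => (String.ofList p.1, String.ofList p.2))

-- ===== PORT B =====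

-- `entries and entries[-1][0] in ('>', '<', '!') and not entries[-1][1]`
def mergeOk (entries : List (List Char × List Char)) : Bool :=
  match entries.getLast? with
  | some (op, v) => (op == ['>'] || op == ['<'] || op == ['!']) && v == ([] : List Char)
  | none => false
def stepB (st : Option (List (List Char × List Char))) (c : Char) :
    Option (List (List Char × List Char)) :=
  match st with
  | none => none
  | some entries =>
    if pdelim c then
      if c == '=' && mergeOk entries then
        some (entries.dropLast ++ [((entries.getLastD ([], [])).1 ++ ['='], [])])
      else
        some (entries ++ [([c], [])])
    else
      match entries.getLast? with
      | none => none
      | some (op, v) => some (entries.dropLast ++ [(op, v ++ [c])])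


def split_conditions_alt (conditions : String) : List (String × String) :=
  match conditions.toList.foldl stepB (some []) with
  | none => []
  | some entries =>
    if entries.any (fun e => e.1 == ['!']) then []
    else entries.map (fun p => (String.ofList p.1, String.ofList p.2))

-- ===== PRECONDITION & SPEC =====

-- Pre_ excludes exactly the inputs on which the Python A raises ValueError: a nonempty string
-- whose first character is not one of '><=!', or any '!' not immediately followed by '='.
def Pre_split_conditions (conditions : String) : Prop :=
  (conditions.toList = [] ∨ pdelim (conditions.toList.headD ' ') = true) ∧
  ∀ i, i < conditions.toList.length →
    conditions.toList[i]? = some '!' → conditions.toList[i + 1]? = some '='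

instance (conditions : String) : Decidable (Pre_split_conditions conditions) := by
  unfold Pre_split_conditions; infer_instance

def pvWitness_split_conditions : String := ">=1!=2"

def Spec_split_conditions (conditions : String) (out : List (String × String)) : Prop :=
  out = split_conditions_alt conditions
instance (conditions : String) (out : List (String × String)) :
    Decidable (Spec_split_conditions conditions out) := by
  unfold Spec_split_conditions; infer_instance

-- ===== CLAIM (what is proved, stated in full; the proofs are below) =====
def Claim_equal_split_conditions : Prop :=
  ∀ (conditions : String), Dom_split_conditions conditions →
    Pre_split_conditions conditions →
    Spec_split_conditions conditions (split_conditions conditions)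

-- ===== LEMMAS AND PROOFS =====

def bangOk (s : List Char) : Prop :=
  ∀ i, i < s.length → s[i]? = some '!' → s[i + 1]? = some '='

-- basic helpers ------------------------------------------------------------

theorem mergeOk_concat (E : List (List Char × List Char)) (op v : List Char) :
    mergeOk (E ++ [(op, v)]) =
      ((op == ['>'] || op == ['<'] || op == ['!']) && v == ([] : List Char)) := by
  simp [mergeOk]

theorem dw_eq_self (p : Char → Bool) (l : List Char) (h : l.takeWhile p = []) :
    l.dropWhile p = l := by
  cases l with
  | nil => rfl
  | cons a t =>
    by_cases hp : p a
    · simp [List.takeWhile_cons, hp] at h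
    · simp [List.dropWhile_cons, hp]

theorem dw_shape (l : List Char) :
    l.dropWhile (fun c => !pdelim c) = [] ∨
    ∃ c t, l.dropWhile (fun c => !pdelim c) = c :: t ∧ pdelim c = true := by
  induction l with
  | nil => left; rfl
  | cons a t ih =>
    by_cases h : pdelim a
    · right; exact ⟨a, t, by simp [h], h⟩
    · simpa [h] using ih

theorem tw_mem (l : List Char) (c : Char)
    (h : c ∈ l.takeWhile (fun c => !pdelim c)) : pdelim c = false := by
  have := List.mem_takeWhile_imp h
  simpa using this

theorem bangOk_suffix {a b : List Char} (h : bangOk (a ++ b)) : bangOk b := by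
  intro i hi hb
  have h1 : (a ++ b)[a.length + i]? = b[i]? := by
    rw [List.getElem?_append_right (by omega)]; simp
  have h2 : (a ++ b)[a.length + i + 1]? = b[i + 1]? := by
    rw [List.getElem?_append_right (by omega)]
    congr 1; omega
  have := h (a.length + i) (by simp; omega) (by rw [h1]; exact hb)
  rw [← h2]; exact this

theorem bangOk_of_suffix {l l' : List Char} (h : l' <:+ l) (hb : bangOk l) : bangOk l' := by
  obtain ⟨a, rfl⟩ := h; exact bangOk_suffix hb

theorem bang_rest {r : List Char} (k : Nat) (hb : bangOk r) :
    bangOk ((r.drop k).dropWhile (fun c => !pdelim c)) :=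
  bangOk_of_suffix ((List.dropWhile_suffix _).trans (List.drop_suffix k r)) hb

theorem head_rest (l : List Char) :
    (l.dropWhile (fun c => !pdelim c) = [] ∨
     pdelim ((l.dropWhile (fun c => !pdelim c)).headD ' ') = true) := by
  rcases dw_shape l with h | ⟨c, t, he, hp⟩
  · exact Or.inl h
  · right; rw [he]; simpa using hp

-- A's loop succeeds on every input admitted by Pre_ --------------------------

theorem loopA_isSome : ∀ (n : Nat) (r : List Char), r.length ≤ n →
    (r = [] ∨ pdelim (r.headD ' ') = true) → bangOk r → (loopA r).isSome := by
  intro n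
  induction n with
  | zero =>
    intro r hr _ _
    have : r = [] := by cases r <;> simp_all
    subst this; rw [loopA.eq_def]; simp
  | succ n ih =>
    intro r hr hhead hbang
    rw [loopA.eq_def]
    split_ifs with h0 h1 h2 h3 h4 h5 h6
    · simp
    all_goals try {
      rw [Option.isSome_map]
      apply ih _ _ (head_rest _) (bang_rest _ hbang)
      have hA := List.length_dropWhile_le (fun c => !pdelim c) (r.drop 2)
      have hB := List.length_dropWhile_le (fun c => !pdelim c) (r.drop 1)
      have hr0 : r.length ≠ 0 := by simpa using h0
      simp only [List.length_drop] at hA hB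
      omega }
    -- all prefix tests failed: contradicts hhead/hbang
    rcases hhead with rfl | hh
    · exact absurd rfl h0
    rcases r with _ | ⟨c, t⟩
    · exact absurd rfl h0
    have hc : ((c = '>' ∨ c = '<') ∨ c = '=') ∨ c = '!' := by
      simpa [pdelim] using hh
    rcases hc with ((rfl | rfl) | rfl) | rfl
    · exact absurd (by simp [List.isPrefixOf]) h2
    · exact absurd (by simp [List.isPrefixOf]) h4
    · exact absurd (by simp [List.isPrefixOf]) h6
    · -- c = '!': bangOk forces t to start with '='
      have h01 : t[0]? = some '=' := by
        have := hbang 0 (by simp) (by simp)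
        simpa using this
      rcases t with _ | ⟨c2, t2⟩
      · simp at h01
      · have : c2 = '=' := by simpa using h01
        subst this
        exact absurd (by simp [List.isPrefixOf]) h5

-- the version characters are absorbed into the last entry -------------------

theorem foldl_version (v : List Char) (hv : ∀ c ∈ v, pdelim c = false) :
    ∀ (E : List (List Char × List Char)) (op w : List Char),
    List.foldl stepB (some (E ++ [(op, w)])) v = some (E ++ [(op, w ++ v)]) := by
  induction v with
  | nil => intro E op w; simp
  | cons c v ih =>
    intro E op w
    have hc : pdelim c = false := hv c (by simp)
    have hv' : ∀ c ∈ v, pdelim c = false := fun c h => hv c (by simp [h])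
    simp only [List.foldl_cons, stepB, hc, Bool.false_eq_true, if_false,
      List.getLast?_concat, List.dropLast_concat]
    rw [ih hv' E op (w ++ [c])]
    simp

-- step evaluation on a delimiter char ---------------------------------------

theorem stepB_op (E : List (List Char × List Char)) (c : Char)
    (h1 : pdelim c = true) (h2 : (c == '=' && mergeOk E) = false) :
    stepB (some E) c = some (E ++ [([c], [])]) := by
  simp [stepB, h1, h2]

theorem stepB_merge (E : List (List Char × List Char)) (op : List Char)
    (hop : op = ['>'] ∨ op = ['<'] ∨ op = ['!']) :
    stepB (some (E ++ [(op, [])])) '=' = some (E ++ [(op ++ ['='], [])]) := by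
  rcases hop with rfl | rfl | rfl <;>
    simp [stepB, mergeOk, pdelim]

-- main lemma: B's fold reproduces A's token list ------------------------------

theorem mainB : ∀ (n : Nat) (r : List Char), r.length ≤ n →
    ∀ ts, loopA r = some ts →
    ∀ E, (r.headD ' ' = '=' → mergeOk E = false) →
    List.foldl stepB (some E) r = some (E ++ ts) := by
  intro n
  induction n with
  | zero =>
    intro r hr ts hts E _
    have : r = [] := by cases r <;> simp_all
    subst this
    rw [loopA.eq_def] at hts
    simp at hts
    subst hts; simp
  | succ n ih =>
    intro r hr ts hts E hsafe
    rw [loopA.eq_def] at hts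
    split_ifs at hts with h0 h1 h2 h3 h4 h5 h6
    -- empty
    · subst h0; simp at hts; subst hts; simp
    -- '>='
    · obtain ⟨t, rfl⟩ := List.isPrefixOf_iff_prefix.mp h1
      rcases Option.map_eq_some_iff.mp hts with ⟨ts', hts', rfl⟩
      simp only [List.cons_append, List.nil_append, List.drop_succ_cons, List.drop_zero] at hts' ⊢
      rw [List.foldl_cons, List.foldl_cons,
        stepB_op E '>' (by decide) (by simp),
        stepB_merge E ['>'] (Or.inl rfl),
        ← List.takeWhile_append_dropWhile (p := fun c => !pdelim c) (l := t),
        List.foldl_append,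
        foldl_version _ (fun c h => tw_mem t c h) E (['>'] ++ ['=']) []]
      rw [List.takeWhile_append_dropWhile]
      have hlen : ((t.dropWhile (fun c => !pdelim c)).length ≤ n) := by
        have hA := List.length_dropWhile_le (fun c => !pdelim c) t
        simp at hr; omega
      rw [ih _ hlen ts' hts' _ ?safe]
      · simp
      case safe =>
        intro _
        rw [mergeOk_concat]; simp
    -- '>'
    · obtain ⟨t, rfl⟩ := List.isPrefixOf_iff_prefix.mp h2
      rcases Option.map_eq_some_iff.mp hts with ⟨ts', hts', rfl⟩
      simp only [List.cons_append, List.nil_append, List.drop_succ_cons, List.drop_zero] at hts' ⊢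
      have hne : t.headD ' ' ≠ '=' := by
        rcases t with _ | ⟨c2, t2⟩
        · simp
        · intro hc2; simp at hc2; subst hc2
          exact h1 (by simp [List.isPrefixOf])
      rw [List.foldl_cons,
        stepB_op E '>' (by decide) (by simp),
        ← List.takeWhile_append_dropWhile (p := fun c => !pdelim c) (l := t),
        List.foldl_append,
        foldl_version _ (fun c h => tw_mem t c h) E ['>'] []]
      rw [List.takeWhile_append_dropWhile]
      have hlen : ((t.dropWhile (fun c => !pdelim c)).length ≤ n) := by
        have hA := List.length_dropWhile_le (fun c => !pdelim c) t
        simp at hr; omega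
      rw [ih _ hlen ts' hts' _ ?safe]
      · simp
      case safe =>
        intro hhd
        rw [mergeOk_concat]
        by_cases hv : t.takeWhile (fun c => !pdelim c) = []
        · exfalso
          rw [dw_eq_self _ _ hv] at hhd
          exact hne hhd
        · simp [hv]
    -- '<='
    · obtain ⟨t, rfl⟩ := List.isPrefixOf_iff_prefix.mp h3
      rcases Option.map_eq_some_iff.mp hts with ⟨ts', hts', rfl⟩
      simp only [List.cons_append, List.nil_append, List.drop_succ_cons, List.drop_zero] at hts' ⊢
      rw [List.foldl_cons, List.foldl_cons,
        stepB_op E '<' (by decide) (by simp),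
        stepB_merge E ['<'] (Or.inr (Or.inl rfl)),
        ← List.takeWhile_append_dropWhile (p := fun c => !pdelim c) (l := t),
        List.foldl_append,
        foldl_version _ (fun c h => tw_mem t c h) E (['<'] ++ ['=']) []]
      rw [List.takeWhile_append_dropWhile]
      have hlen : ((t.dropWhile (fun c => !pdelim c)).length ≤ n) := by
        have hA := List.length_dropWhile_le (fun c => !pdelim c) t
        simp at hr; omega
      rw [ih _ hlen ts' hts' _ ?safe]
      · simp
      case safe =>
        intro _
        rw [mergeOk_concat]; simp
    -- '<'
    · obtain ⟨t, rfl⟩ := List.isPrefixOf_iff_prefix.mp h4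
      rcases Option.map_eq_some_iff.mp hts with ⟨ts', hts', rfl⟩
      simp only [List.cons_append, List.nil_append, List.drop_succ_cons, List.drop_zero] at hts' ⊢
      have hne : t.headD ' ' ≠ '=' := by
        rcases t with _ | ⟨c2, t2⟩
        · simp
        · intro hc2; simp at hc2; subst hc2
          exact h3 (by simp [List.isPrefixOf])
      rw [List.foldl_cons,
        stepB_op E '<' (by decide) (by simp),
        ← List.takeWhile_append_dropWhile (p := fun c => !pdelim c) (l := t),
        List.foldl_append,
        foldl_version _ (fun c h => tw_mem t c h) E ['<'] []]
      rw [List.takeWhile_append_dropWhile]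
      have hlen : ((t.dropWhile (fun c => !pdelim c)).length ≤ n) := by
        have hA := List.length_dropWhile_le (fun c => !pdelim c) t
        simp at hr; omega
      rw [ih _ hlen ts' hts' _ ?safe]
      · simp
      case safe =>
        intro hhd
        rw [mergeOk_concat]
        by_cases hv : t.takeWhile (fun c => !pdelim c) = []
        · exfalso
          rw [dw_eq_self _ _ hv] at hhd
          exact hne hhd
        · simp [hv]
    -- '!='
    · obtain ⟨t, rfl⟩ := List.isPrefixOf_iff_prefix.mp h5
      rcases Option.map_eq_some_iff.mp hts with ⟨ts', hts', rfl⟩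
      simp only [List.cons_append, List.nil_append, List.drop_succ_cons, List.drop_zero] at hts' ⊢
      rw [List.foldl_cons, List.foldl_cons,
        stepB_op E '!' (by decide) (by simp),
        stepB_merge E ['!'] (Or.inr (Or.inr rfl)),
        ← List.takeWhile_append_dropWhile (p := fun c => !pdelim c) (l := t),
        List.foldl_append,
        foldl_version _ (fun c h => tw_mem t c h) E (['!'] ++ ['=']) []]
      rw [List.takeWhile_append_dropWhile]
      have hlen : ((t.dropWhile (fun c => !pdelim c)).length ≤ n) := by
        have hA := List.length_dropWhile_le (fun c => !pdelim c) t
        simp at hr; omega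
      rw [ih _ hlen ts' hts' _ ?safe]
      · simp
      case safe =>
        intro _
        rw [mergeOk_concat]; simp
    -- '='
    · obtain ⟨t, rfl⟩ := List.isPrefixOf_iff_prefix.mp h6
      rcases Option.map_eq_some_iff.mp hts with ⟨ts', hts', rfl⟩
      simp only [List.cons_append, List.nil_append, List.drop_succ_cons, List.drop_zero] at hts' ⊢
      have hm : mergeOk E = false := hsafe (by simp)
      rw [List.foldl_cons,
        stepB_op E '=' (by decide) (by simp [hm]),
        ← List.takeWhile_append_dropWhile (p := fun c => !pdelim c) (l := t),
        List.foldl_append,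
        foldl_version _ (fun c h => tw_mem t c h) E ['='] []]
      rw [List.takeWhile_append_dropWhile]
      have hlen : ((t.dropWhile (fun c => !pdelim c)).length ≤ n) := by
        have hA := List.length_dropWhile_le (fun c => !pdelim c) t
        simp at hr; omega
      rw [ih _ hlen ts' hts' _ ?safe]
      · simp
      case safe =>
        intro _
        rw [mergeOk_concat]; simp

-- A never produces a lone '!' operator ---------------------------------------

theorem noBang : ∀ (n : Nat) (r : List Char), r.length ≤ n →
    ∀ ts, loopA r = some ts → ts.any (fun e => e.1 == ['!']) = false := by
  intro n
  induction n with
  | zero =>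
    intro r hr ts hts
    have : r = [] := by cases r <;> simp_all
    subst this
    rw [loopA.eq_def] at hts; simp at hts; subst hts; simp
  | succ n ih =>
    intro r hr ts hts
    rw [loopA.eq_def] at hts
    split_ifs at hts with h0 h1 h2 h3 h4 h5 h6
    · simp at hts; subst hts; simp
    all_goals first
      | (rcases Option.map_eq_some_iff.mp hts with ⟨ts', hts', rfl⟩
         have hlen : (((r.drop 2).dropWhile (fun c => !pdelim c)).length ≤ n) ∧
                     (((r.drop 1).dropWhile (fun c => !pdelim c)).length ≤ n) := by
           have hA := List.length_dropWhile_le (fun c => !pdelim c) (r.drop 2)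
           have hB := List.length_dropWhile_le (fun c => !pdelim c) (r.drop 1)
           have hr0 : r.length ≠ 0 := by simpa using h0
           simp only [List.length_drop] at hA hB
           constructor <;> omega
         simp only [List.any_cons]
         rw [ih _ hlen.1 ts' hts']
         simp)
      | (rcases Option.map_eq_some_iff.mp hts with ⟨ts', hts', rfl⟩
         have hlen : (((r.drop 1).dropWhile (fun c => !pdelim c)).length ≤ n) := by
           have hB := List.length_dropWhile_le (fun c => !pdelim c) (r.drop 1)
           have hr0 : r.length ≠ 0 := by simpa using h0
           simp only [List.length_drop] at hB
           omega
         simp only [List.any_cons]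
         rw [ih _ hlen ts' hts']
         simp)

-- ===== VERDICT (by name: the statement is the Claim_ definition above) =====
theorem split_conditions_spec : Claim_equal_split_conditions := by
  unfold Claim_equal_split_conditions Spec_split_conditions
  intro conditions _ hpre
  have hb : bangOk conditions.toList := hpre.2
  have hsome := loopA_isSome conditions.toList.length conditions.toList le_rfl hpre.1 hb
  obtain ⟨ts, hts⟩ := Option.isSome_iff_exists.mp hsome
  have hfold := mainB conditions.toList.length conditions.toList le_rfl ts hts []
    (fun _ => by simp [mergeOk])
  have hnb := noBang conditions.toList.length conditions.toList le_rfl ts hts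
  unfold split_conditions split_conditions_alt
  rw [hts, hfold]
  simp [hnb]
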